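-- pv_equiv track=rewrite | github.com/chengyitang/interview-algo-practices | meta-intern-oa/meta.py | longestSubarrayWithMaximum
-- ===== SOURCE A (Python) =====
-- from collections import defaultdict
--
-- def longestSubarrayWithMaximum(salesData, frequencyThreshold):
--
--     mp = defaultdict(int)
--     l, r = 0, 0
--     ret = 0
--
--     while r < len(salesData):
--         mp[salesData[r]] += 1
--
--         while mp[salesData[r]] > frequencyThreshold:
--             mp[salesData[l]] -= 1
--             l += 1
--
--         ret = max(ret, r - l + 1)
--         r += 1
--
--     return ret
-- ===== SOURCE B (Python) =====
-- from collections import defaultdict, deque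
--
-- def longestSubarrayWithMaximum(salesData, frequencyThreshold):
--     # Window left edge jumps directly past the oldest excess occurrence,
--     # tracked with per-value index deques instead of counts.
--     positions = defaultdict(deque)
--     l = 0
--     ret = 0
--     for r, x in enumerate(salesData):
--         dq = positions[x]
--         dq.append(r)
--         if len(dq) > frequencyThreshold:
--             oldest = dq.popleft()
--             l = max(l, oldest + 1)
--         ret = max(ret, r - l + 1)
--     return ret
-- ===== Notes on version B (the rewrite author's own statement) =====
-- stated objective: alternative
-- what changed: Replaces A's count map with per-value deques of occurrence indices, so the left edge jumps directly past the oldest excess occurrence instead of being advanced element by element while decrementing counts.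
import Mathlib
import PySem

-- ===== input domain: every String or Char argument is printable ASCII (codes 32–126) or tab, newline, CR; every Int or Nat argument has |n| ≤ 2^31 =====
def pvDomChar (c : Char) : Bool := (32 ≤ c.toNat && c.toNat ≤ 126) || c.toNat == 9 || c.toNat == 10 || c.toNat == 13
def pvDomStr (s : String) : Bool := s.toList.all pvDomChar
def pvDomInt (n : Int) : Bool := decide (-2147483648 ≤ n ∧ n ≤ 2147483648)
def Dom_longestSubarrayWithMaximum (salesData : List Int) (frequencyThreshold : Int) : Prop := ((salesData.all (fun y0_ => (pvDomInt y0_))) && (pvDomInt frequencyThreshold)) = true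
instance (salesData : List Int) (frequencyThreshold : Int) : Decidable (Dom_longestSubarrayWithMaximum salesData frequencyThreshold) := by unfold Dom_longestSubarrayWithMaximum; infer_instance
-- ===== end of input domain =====

-- B keeps per-value deques of occurrence indices and jumps the left edge past the
-- oldest excess occurrence, instead of A's count map with an element-by-element inner while.

-- ===== PORT A =====
-- inner 'while mp[salesData[r]] > frequencyThreshold' loop; fuel (length+1) is enough for
-- every l ≥ 0: when l runs off the array Python raises IndexError (the pyGet? none branch,
-- excluded by Pre_), so the fuel never runs out on admitted inputs.
def aShrink (sd : List Int) (x t : Int) : Nat → PySem.Dict Int Int → Int → (PySem.Dict Int Int × Int)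
  | 0, mp, l => (mp, l)
  | fuel+1, mp, l =>
    if mp.getD x 0 > t then
      match PySem.List.pyGet? sd l with
      | none => (mp, l)          -- Python raises IndexError here (outside Pre_)
      | some v => aShrink sd x t fuel (mp.insert v (mp.getD v 0 - 1)) (l+1)
    else (mp, l)

-- one iteration of the outer 'while r < len(salesData)' loop; state = (mp, l, ret)
def aStep (sd : List Int) (t : Int) (st : PySem.Dict Int Int × Int × Int) (r : Nat) : PySem.Dict Int Int × Int × Int :=
  match PySem.List.pyGet? sd (r : Int) with
  | none => st                   -- unreachable: r < len(sd)
  | some x =>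
    let mp := st.1.insert x (st.1.getD x 0 + 1)
    let p := aShrink sd x t (sd.length + 1) mp st.2.1
    (p.1, p.2, max st.2.2 ((r : Int) - p.2 + 1))

def longestSubarrayWithMaximum (salesData : List Int) (frequencyThreshold : Int) : Int :=
  ((List.range salesData.length).foldl (aStep salesData frequencyThreshold) (PySem.Dict.empty, 0, 0)).2.2

-- ===== PORT B =====
-- one iteration of 'for r, x in enumerate(salesData)'; state = (positions, l, ret)
def bStep (t : Int) (st : PySem.Dict Int (List Int) × Int × Int) (p : Int × Int) : PySem.Dict Int (List Int) × Int × Int :=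
  let dq := st.1.getD p.2 [] ++ [p.1]
  if (dq.length : Int) > t then
    let l := max st.2.1 (dq.headD 0 + 1)
    (st.1.insert p.2 dq.tail, l, max st.2.2 (p.1 - l + 1))
  else
    (st.1.insert p.2 dq, st.2.1, max st.2.2 (p.1 - st.2.1 + 1))

def longestSubarrayWithMaximum_alt (salesData : List Int) (frequencyThreshold : Int) : Int :=
  ((PySem.List.enumerate salesData 0).foldl (bStep frequencyThreshold) (PySem.Dict.empty, 0, 0)).2.2

-- ===== PRECONDITION & SPEC =====
-- Pre_ excludes exactly the inputs where A raises IndexError: a negative threshold with a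
-- nonempty list makes A's inner while walk l past the end of the array.
def Pre_longestSubarrayWithMaximum (salesData : List Int) (frequencyThreshold : Int) : Prop :=
  salesData = [] ∨ 0 ≤ frequencyThreshold
instance (salesData : List Int) (frequencyThreshold : Int) : Decidable (Pre_longestSubarrayWithMaximum salesData frequencyThreshold) := by unfold Pre_longestSubarrayWithMaximum; infer_instance
def pvWitness_longestSubarrayWithMaximum : List Int × Int := ([1, 2, 1, 2, 1], 2)

def Spec_longestSubarrayWithMaximum (salesData : List Int) (frequencyThreshold : Int) (out : Int) : Prop := out = longestSubarrayWithMaximum_alt salesData frequencyThreshold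
instance (salesData : List Int) (frequencyThreshold : Int) (out : Int) : Decidable (Spec_longestSubarrayWithMaximum salesData frequencyThreshold out) := by unfold Spec_longestSubarrayWithMaximum; infer_instance

-- ===== CLAIM (what is proved, stated in full; the proofs are below) =====
def Claim_equal_longestSubarrayWithMaximum : Prop := ∀ (salesData : List Int) (frequencyThreshold : Int), Dom_longestSubarrayWithMaximum salesData frequencyThreshold → Pre_longestSubarrayWithMaximum salesData frequencyThreshold → Spec_longestSubarrayWithMaximum salesData frequencyThreshold (longestSubarrayWithMaximum salesData frequencyThreshold)

-- ===== LEMMAS AND PROOFS =====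

-- occurrence indices of value v among the first r elements of sd
def occsL (sd : List Int) (v : Int) (r : Nat) : List Nat :=
  (List.range r).filter (fun i => sd.getD i 0 == v)

-- number of occurrences of v in the window [L, r)
def wcnt (sd : List Int) (v : Int) (L r : Nat) : Nat :=
  (occsL sd v r).countP (fun i => decide (L ≤ i))

theorem mem_occsL {sd : List Int} {v : Int} {r i : Nat} :
    i ∈ occsL sd v r ↔ i < r ∧ sd.getD i 0 = v := by
  simp [occsL, List.mem_filter, List.mem_range]

theorem occsL_sorted (sd : List Int) (v : Int) (r : Nat) :
    (occsL sd v r).Pairwise (· < ·) :=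
  (List.pairwise_lt_range).filter _

theorem occsL_nodup (sd : List Int) (v : Int) (r : Nat) : (occsL sd v r).Nodup :=
  (List.nodup_range).filter _

theorem occsL_succ (sd : List Int) (v : Int) (r : Nat) :
    occsL sd v (r+1) = occsL sd v r ++ (if sd.getD r 0 = v then [r] else []) := by
  unfold occsL
  rw [List.range_succ, List.filter_append]
  congr 1
  simp only [List.filter_cons, List.filter_nil]
  by_cases h : sd.getD r 0 = v
  · rw [if_pos (beq_iff_eq.mpr h), if_pos h]
  · rw [if_neg (by simp only [beq_iff_eq]; exact h), if_neg h]

theorem occsL_succ_self {sd : List Int} {x : Int} {r : Nat} (hx : sd.getD r 0 = x) :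
    occsL sd x (r+1) = occsL sd x r ++ [r] := by
  rw [occsL_succ, if_pos hx]

theorem occsL_succ_ne {sd : List Int} {v x : Int} {r : Nat} (hx : sd.getD r 0 = x) (hv : v ≠ x) :
    occsL sd v (r+1) = occsL sd v r := by
  rw [occsL_succ, if_neg (by rw [hx]; exact fun h => hv h.symm), List.append_nil]

theorem occsL_zero (sd : List Int) (v : Int) : occsL sd v 0 = [] := by
  simp [occsL]

theorem wcnt_succ_right_self {sd : List Int} {x : Int} {r L : Nat}
    (hx : sd.getD r 0 = x) (hL : L ≤ r) :
    wcnt sd x L (r+1) = wcnt sd x L r + 1 := by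
  unfold wcnt
  rw [occsL_succ_self hx, List.countP_append]
  simp [hL]

theorem wcnt_succ_right_ne {sd : List Int} {v x : Int} {r L : Nat}
    (hx : sd.getD r 0 = x) (hv : v ≠ x) :
    wcnt sd v L (r+1) = wcnt sd v L r := by
  unfold wcnt
  rw [occsL_succ_ne hx hv]

theorem countP_ge_split (O : List Nat) (L : Nat) :
    O.countP (fun i => decide (L ≤ i)) = O.countP (fun i => decide (L+1 ≤ i)) + O.count L := by
  induction O with
  | nil => simp
  | cons a tl ih =>
    simp only [List.countP_cons, List.count_cons, ih]
    by_cases h1 : L ≤ a <;> by_cases h2 : L + 1 ≤ a <;> by_cases h3 : a = L <;>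
      simp [h1, h2, h3] <;> omega

theorem count_occsL (sd : List Int) (v : Int) (r L : Nat) :
    (occsL sd v r).count L = if L < r ∧ sd.getD L 0 = v then 1 else 0 := by
  split
  · exact List.count_eq_one_of_mem (occsL_nodup sd v r) (mem_occsL.mpr (by assumption))
  · exact List.count_eq_zero_of_not_mem (fun hmem => by
      exact absurd (mem_occsL.mp hmem) (by assumption))

theorem wcnt_succ_left (sd : List Int) (v : Int) (L r : Nat) :
    wcnt sd v L r = wcnt sd v (L+1) r + (if L < r ∧ sd.getD L 0 = v then 1 else 0) := by
  unfold wcnt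
  rw [countP_ge_split, count_occsL]

theorem wcnt_anti (sd : List Int) (v : Int) (r : Nat) {L M : Nat} (h : L ≤ M) :
    wcnt sd v M r ≤ wcnt sd v L r := by
  unfold wcnt
  exact List.countP_mono_left (fun a _ hM => by
    simp only [decide_eq_true_eq] at *
    omega)

theorem wcnt_le_len (sd : List Int) (v : Int) (L r : Nat) :
    wcnt sd v L r ≤ (occsL sd v r).length :=
  List.countP_le_length

theorem filter_ge_eq_drop (O : List Nat) (b k : Nat)
    (h1 : ∀ a ∈ O.take k, ¬ b ≤ a) (h2 : ∀ a ∈ O.drop k, b ≤ a) :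
    O.filter (fun a => decide (b ≤ a)) = O.drop k := by
  conv_lhs => rw [← List.take_append_drop k O]
  rw [List.filter_append,
      List.filter_eq_nil_iff.mpr (by intro a ha; simpa using h1 a ha),
      List.filter_eq_self.mpr (by intro a ha; simpa using h2 a ha)]
  simp

theorem countP_ge_getElem (O : List Nat) (hs : O.Pairwise (· < ·)) (k : Nat) (hk : k < O.length) :
    O.countP (fun a => decide (O[k] ≤ a)) = O.length - k := by
  rw [List.countP_eq_length_filter,
      filter_ge_eq_drop O O[k] k
        (by
          intro a ha
          obtain ⟨j, hj, rfl⟩ := List.getElem_of_mem ha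
          have hjk : j < k := by rw [List.length_take] at hj; omega
          rw [List.getElem_take]
          have := (List.pairwise_iff_getElem.mp hs) j k (by omega) hk hjk
          omega)
        (by
          intro a ha
          obtain ⟨j, hj, rfl⟩ := List.getElem_of_mem ha
          rw [List.length_drop] at hj
          rw [List.getElem_drop]
          rcases Nat.eq_zero_or_pos j with hj0 | hj0
          · subst hj0; simp
          · have := (List.pairwise_iff_getElem.mp hs) k (k + j) hk (by omega) (by omega)
            omega),
      List.length_drop]

theorem countP_gt_getElem (O : List Nat) (hs : O.Pairwise (· < ·)) (k : Nat) (hk : k < O.length) :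
    O.countP (fun a => decide (O[k] + 1 ≤ a)) = O.length - (k + 1) := by
  rw [List.countP_eq_length_filter,
      filter_ge_eq_drop O (O[k] + 1) (k + 1)
        (by
          intro a ha
          obtain ⟨j, hj, rfl⟩ := List.getElem_of_mem ha
          have hjk : j < k + 1 := by rw [List.length_take] at hj; omega
          rw [List.getElem_take]
          rcases Nat.lt_or_ge j k with hjk' | hjk'
          · have := (List.pairwise_iff_getElem.mp hs) j k (by omega) hk hjk'
            omega
          · have : j = k := by omega
            subst this; omega)
        (by
          intro a ha
          obtain ⟨j, hj, rfl⟩ := List.getElem_of_mem ha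
          rw [List.length_drop] at hj
          rw [List.getElem_drop]
          have := (List.pairwise_iff_getElem.mp hs) k (k + 1 + j) hk (by omega) (by omega)
          omega),
      List.length_drop]

theorem wcnt_at_getElem (sd : List Int) (x : Int) (r k : Nat)
    (hk : k < (occsL sd x r).length) :
    wcnt sd x (occsL sd x r)[k] r = (occsL sd x r).length - k :=
  countP_ge_getElem _ (occsL_sorted sd x r) k hk

theorem wcnt_at_getElem_succ (sd : List Int) (x : Int) (r k : Nat)
    (hk : k < (occsL sd x r).length) :
    wcnt sd x ((occsL sd x r)[k] + 1) r = (occsL sd x r).length - (k + 1) :=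
  countP_gt_getElem _ (occsL_sorted sd x r) k hk

-- the inner while loop of A lands exactly at Q, the left edge at which the window
-- count of x is first back within the threshold
theorem aShrink_spec (sd : List Int) (x t : Int) (ht : 0 ≤ t) (r : Nat) (hr : r < sd.length) :
    ∀ (fuel L Q : Nat) (mp : PySem.Dict Int Int),
      L ≤ Q → Q ≤ r + 1 →
      (∀ v, mp.getD v 0 = (wcnt sd v L (r+1) : Int)) →
      wcnt sd x Q (r+1) ≤ t.toNat →
      (∀ M, L ≤ M → M < Q → t.toNat < wcnt sd x M (r+1)) →
      Q ≤ L + fuel →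
      ∃ mp', aShrink sd x t fuel mp (L : Int) = (mp', (Q : Int)) ∧
        (∀ v, mp'.getD v 0 = (wcnt sd v Q (r+1) : Int)) := by
  intro fuel
  induction fuel with
  | zero =>
    intro L Q mp hLQ hQr hmp hQ hbelow hfuel
    have : L = Q := by omega
    subst this
    exact ⟨mp, rfl, hmp⟩
  | succ fuel ih =>
    intro L Q mp hLQ hQr hmp hQ hbelow hfuel
    have hunf : aShrink sd x t (fuel+1) mp (L : Int) =
        (if mp.getD x 0 > t then
          (match PySem.List.pyGet? sd (L : Int) with
            | none => (mp, (L : Int))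
            | some v => aShrink sd x t fuel (mp.insert v (mp.getD v 0 - 1)) ((L : Int) + 1))
         else (mp, (L : Int))) := rfl
    by_cases hLQ' : L = Q
    · subst hLQ'
      have hcond : ¬ mp.getD x 0 > t := by
        rw [hmp x]
        have h1 : (wcnt sd x L (r+1) : Int) ≤ (t.toNat : Int) := by exact_mod_cast hQ
        have h2 : (t.toNat : Int) = t := Int.toNat_of_nonneg ht
        omega
      rw [hunf, if_neg hcond]
      exact ⟨mp, rfl, hmp⟩
    · have hLltQ : L < Q := by omega
      have hLlen : L < sd.length := by omega
      have hcond : mp.getD x 0 > t := by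
        rw [hmp x]
        have h1 : (t.toNat : Int) < (wcnt sd x L (r+1) : Int) := by
          exact_mod_cast hbelow L le_rfl hLltQ
        have h2 : (t.toNat : Int) = t := Int.toNat_of_nonneg ht
        omega
      have hget : PySem.List.pyGet? sd (L : Int) = some sd[L] := by
        rw [PySem.List.pyGet?_natCast, List.getElem?_eq_getElem hLlen]
      have hgd : sd.getD L 0 = sd[L] := List.getD_eq_getElem sd 0 hLlen
      rw [hunf, if_pos hcond, hget]
      have hmp' : ∀ v, (mp.insert sd[L] (mp.getD sd[L] 0 - 1)).getD v 0
          = (wcnt sd v (L+1) (r+1) : Int) := by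
        intro v
        by_cases hv : v = sd[L]
        · subst hv
          rw [PySem.Dict.getD_insert_self, hmp]
          have := wcnt_succ_left sd sd[L] L (r+1)
          rw [if_pos ⟨by omega, hgd⟩] at this
          omega
        · rw [PySem.Dict.getD_insert_of_ne _ _ _ hv, hmp]
          have := wcnt_succ_left sd v L (r+1)
          rw [if_neg (by rintro ⟨-, h2⟩; exact hv (by rw [← h2, hgd]))] at this
          omega
      have hcast : ((L : Int) + 1) = ((L + 1 : Nat) : Int) := by push_cast; ring
      rw [hcast]
      exact ih (L+1) Q _ (by omega) hQr hmp' hQ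
        (fun M hM1 hM2 => hbelow M (by omega) hM2) (by omega)

-- the two folds, indexed by prefix length
def aFold (sd : List Int) (t : Int) (r : Nat) : PySem.Dict Int Int × Int × Int :=
  (List.range r).foldl (aStep sd t) (PySem.Dict.empty, 0, 0)

def bFold (sd : List Int) (t : Int) (r : Nat) : PySem.Dict Int (List Int) × Int × Int :=
  (List.range r).foldl (fun st (i : Nat) => bStep t st ((i : Int), sd.getD i 0)) (PySem.Dict.empty, 0, 0)

theorem a_eq_aFold (sd : List Int) (t : Int) :
    longestSubarrayWithMaximum sd t = (aFold sd t sd.length).2.2 := rfl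

theorem b_eq_bFold (sd : List Int) (t : Int) :
    longestSubarrayWithMaximum_alt sd t = (bFold sd t sd.length).2.2 := by
  unfold longestSubarrayWithMaximum_alt bFold
  have hl : PySem.List.enumerate sd 0
      = (List.range sd.length).map (fun (i : Nat) => ((i : Int), sd.getD i 0)) := by
    rw [PySem.List.enumerate_eq_map_pyRange sd 0,
        show PySem.List.len sd = ((sd.length : Nat) : Int) by simp [pysem],
        PySem.List.pyRange_zero_nat, List.map_map]
    apply List.map_congr_left
    intro k _
    simp
  rw [hl, List.foldl_map]

theorem aFold_succ (sd : List Int) (t : Int) (r : Nat) :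
    aFold sd t (r+1) = aStep sd t (aFold sd t r) r := by
  unfold aFold
  rw [List.range_succ, List.foldl_append, List.foldl_cons, List.foldl_nil]

theorem bFold_succ (sd : List Int) (t : Int) (r : Nat) :
    bFold sd t (r+1) = bStep t (bFold sd t r) ((r : Int), sd.getD r 0) := by
  unfold bFold
  rw [List.range_succ, List.foldl_append, List.foldl_cons, List.foldl_nil]

theorem main_inv (sd : List Int) (t : Int) (ht : 0 ≤ t) :
    ∀ r, r ≤ sd.length →
    ∃ (L : Nat) (ret : Int) (mp : PySem.Dict Int Int) (pos : PySem.Dict Int (List Int)),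
      aFold sd t r = (mp, (L : Int), ret) ∧ bFold sd t r = (pos, (L : Int), ret) ∧
      L ≤ r ∧
      (∀ v, mp.getD v 0 = (wcnt sd v L r : Int)) ∧
      (∀ v, wcnt sd v L r ≤ t.toNat) ∧
      (∀ v, pos.getD v [] =
        ((occsL sd v r).drop ((occsL sd v r).length - t.toNat)).map (fun (i : Nat) => (i : Int))) := by
  intro r
  induction r with
  | zero =>
    intro _
    refine ⟨0, 0, PySem.Dict.empty, PySem.Dict.empty, rfl, rfl, le_rfl, ?_, ?_, ?_⟩
    · intro v; simp [wcnt, occsL_zero]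
    · intro v; simp [wcnt, occsL_zero]
    · intro v; simp [occsL_zero]
  | succ r ih =>
    intro hr1
    obtain ⟨L, ret, mp, pos, ha, hb, hLr, hmp, hbound, hpos⟩ := ih (by omega)
    have hrlen : r < sd.length := by omega
    set x := sd.getD r 0 with hxdef
    have hx : sd.getD r 0 = x := hxdef.symm
    have hgd : sd.getD r 0 = sd[r] := List.getD_eq_getElem sd 0 hrlen
    have hget : PySem.List.pyGet? sd (r : Int) = some x := by
      rw [PySem.List.pyGet?_natCast, List.getElem?_eq_getElem hrlen, ← hgd]
    set t' := t.toNat with ht'def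
    have htc : (t' : Int) = t := Int.toNat_of_nonneg ht
    set c := (occsL sd x r).length with hcdef
    have hO : occsL sd x (r+1) = occsL sd x r ++ [r] := occsL_succ_self hx
    have hlenO : (occsL sd x (r+1)).length = c + 1 := by rw [hO]; simp; exact hcdef.symm
    have hwr : wcnt sd x L (r+1) = wcnt sd x L r + 1 := wcnt_succ_right_self hx hLr
    have hwxc : wcnt sd x L r ≤ c := wcnt_le_len sd x L r
    -- A's increment step
    have hmp1 : ∀ v, (mp.insert x (mp.getD x 0 + 1)).getD v 0 = (wcnt sd v L (r+1) : Int) := by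
      intro v
      by_cases hv : v = x
      · subst hv
        rw [PySem.Dict.getD_insert_self, hmp, hwr]
        push_cast; ring
      · rw [PySem.Dict.getD_insert_of_ne _ _ _ hv, hmp, wcnt_succ_right_ne hx hv]
    have hastep : aFold sd t (r+1) =
        ((aShrink sd x t (sd.length+1) (mp.insert x (mp.getD x 0 + 1)) (L : Int)).1,
         (aShrink sd x t (sd.length+1) (mp.insert x (mp.getD x 0 + 1)) (L : Int)).2,
         max ret ((r : Int) - (aShrink sd x t (sd.length+1) (mp.insert x (mp.getD x 0 + 1)) (L : Int)).2 + 1)) := by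
      rw [aFold_succ, ha]
      show (match PySem.List.pyGet? sd (r : Int) with
            | none => (mp, (L : Int), ret)
            | some v =>
              ((aShrink sd v t (sd.length+1) (mp.insert v (mp.getD v 0 + 1)) (L : Int)).1,
               (aShrink sd v t (sd.length+1) (mp.insert v (mp.getD v 0 + 1)) (L : Int)).2,
               max ret ((r : Int) - (aShrink sd v t (sd.length+1) (mp.insert v (mp.getD v 0 + 1)) (L : Int)).2 + 1))) = _
      rw [hget]
    have hbstep : bFold sd t (r+1) =
        (if ((pos.getD x [] ++ [(r : Int)]).length : Int) > t then
          (pos.insert x (pos.getD x [] ++ [(r : Int)]).tail,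
           max (L : Int) ((pos.getD x [] ++ [(r : Int)]).headD 0 + 1),
           max ret ((r : Int) - max (L : Int) ((pos.getD x [] ++ [(r : Int)]).headD 0 + 1) + 1))
        else
          (pos.insert x (pos.getD x [] ++ [(r : Int)]), (L : Int), max ret ((r : Int) - (L : Int) + 1))) := by
      rw [bFold_succ, hb]
      rfl
    rcases Nat.lt_or_ge c t' with hc | hc
    · -- no-pop case: fewer than t' earlier occurrences of x
      have hc0 : c - t' = 0 := by omega
      have hdq : pos.getD x [] ++ [(r : Int)] = (occsL sd x (r+1)).map (fun (i : Nat) => (i : Int)) := by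
        rw [hpos x, ← hcdef, hc0, List.drop_zero, hO, List.map_append]
        simp
      have hdqlen : ((pos.getD x [] ++ [(r : Int)]).length : Int) = (c : Int) + 1 := by
        rw [hdq, List.length_map, hlenO]; push_cast; ring
      have hcondB : ¬ ((pos.getD x [] ++ [(r : Int)]).length : Int) > t := by
        rw [hdqlen]; omega
      rw [if_neg hcondB] at hbstep
      have hQle : wcnt sd x L (r+1) ≤ t' := by omega
      obtain ⟨mp', hsh, hmp'⟩ := aShrink_spec sd x t ht r hrlen (sd.length+1) L L
        (mp.insert x (mp.getD x 0 + 1)) le_rfl (by omega) hmp1 hQle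
        (fun M h1 h2 => absurd (lt_of_le_of_lt h1 h2) (lt_irrefl L)) (by omega)
      rw [hsh] at hastep
      refine ⟨L, max ret ((r : Int) - (L : Int) + 1), mp', pos.insert x (pos.getD x [] ++ [(r : Int)]),
        hastep, hbstep, by omega, hmp', ?_, ?_⟩
      · intro v
        by_cases hv : v = x
        · subst hv; exact hQle
        · rw [wcnt_succ_right_ne hx hv]; exact hbound v
      · intro v
        by_cases hv : v = x
        · subst hv
          rw [PySem.Dict.getD_insert_self, hdq, hlenO,
              show c + 1 - t' = 0 by omega, List.drop_zero]
        · rw [PySem.Dict.getD_insert_of_ne _ _ _ hv, hpos v, occsL_succ_ne hx hv]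
    · -- pop case: at least t' earlier occurrences of x
      have hkO : c - t' < (occsL sd x (r+1)).length := by omega
      set q := (occsL sd x (r+1))[c - t'] with hqdef
      have hqmem : q ∈ occsL sd x (r+1) := List.getElem_mem hkO
      have hqlt : q < r + 1 := (mem_occsL.mp hqmem).1
      have hw1 : wcnt sd x q (r+1) = t' + 1 := by
        have := wcnt_at_getElem sd x (r+1) (c - t') hkO
        rw [hlenO] at this; rw [← hqdef] at this; omega
      have hw2 : wcnt sd x (q+1) (r+1) = t' := by
        have := wcnt_at_getElem_succ sd x (r+1) (c - t') hkO
        rw [hlenO] at this; rw [← hqdef] at this; omega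
      have hsplit : (occsL sd x (r+1)).drop (c - t') = q :: (occsL sd x (r+1)).drop (c - t' + 1) := by
        rw [List.drop_eq_getElem_cons hkO]
      have hdrop : (occsL sd x (r+1)).drop (c - t') = (occsL sd x r).drop (c - t') ++ [r] := by
        rw [hO, List.drop_append_of_le_length (by omega : c - t' ≤ (occsL sd x r).length)]
      have hdq : pos.getD x [] ++ [(r : Int)]
          = (q :: (occsL sd x (r+1)).drop (c - t' + 1)).map (fun (i : Nat) => (i : Int)) := by
        rw [hpos x, ← hcdef, ← hsplit, hdrop, List.map_append]
        rfl
      have hdqlen : ((pos.getD x [] ++ [(r : Int)]).length : Int) = (t' : Int) + 1 := by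
        rw [hdq, List.length_map, List.length_cons, List.length_drop, hlenO]
        push_cast; omega
      have hcondB : ((pos.getD x [] ++ [(r : Int)]).length : Int) > t := by
        rw [hdqlen]; omega
      rw [if_pos hcondB] at hbstep
      have hhead : (pos.getD x [] ++ [(r : Int)]).headD 0 = (q : Int) := by
        rw [hdq]; rfl
      have htail : (pos.getD x [] ++ [(r : Int)]).tail
          = ((occsL sd x (r+1)).drop (c - t' + 1)).map (fun (i : Nat) => (i : Int)) := by
        rw [hdq]; rfl
      rw [hhead, htail] at hbstep
      have hwle : wcnt sd x L (r+1) ≤ t' + 1 := by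
        have := hbound x; omega
      by_cases hcase : wcnt sd x L (r+1) ≤ t'
      · -- the incoming window still has room for x: neither side moves l
        have hqL : q + 1 ≤ L := by
          by_contra hcon
          have hLq : L ≤ q := by omega
          have := wcnt_anti sd x (r+1) hLq
          omega
        have hmax : max (L : Int) ((q : Int) + 1) = (L : Int) := by
          rw [max_eq_left]; exact_mod_cast hqL
        rw [hmax] at hbstep
        obtain ⟨mp', hsh, hmp'⟩ := aShrink_spec sd x t ht r hrlen (sd.length+1) L L
          (mp.insert x (mp.getD x 0 + 1)) le_rfl (by omega) hmp1 hcase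
          (fun M h1 h2 => absurd (lt_of_le_of_lt h1 h2) (lt_irrefl L)) (by omega)
        rw [hsh] at hastep
        refine ⟨L, max ret ((r : Int) - (L : Int) + 1), mp',
          pos.insert x (((occsL sd x (r+1)).drop (c - t' + 1)).map (fun (i : Nat) => (i : Int))),
          hastep, hbstep, by omega, hmp', ?_, ?_⟩
        · intro v
          by_cases hv : v = x
          · subst hv; exact hcase
          · rw [wcnt_succ_right_ne hx hv]; exact hbound v
        · intro v
          by_cases hv : v = x
          · subst hv
            rw [PySem.Dict.getD_insert_self, hlenO, show c + 1 - t' = c - t' + 1 by omega]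
          · rw [PySem.Dict.getD_insert_of_ne _ _ _ hv, hpos v, occsL_succ_ne hx hv]
      · -- the window overflows on x: both sides move l just past q
        have hweq : wcnt sd x L (r+1) = t' + 1 := by omega
        have hLq : L ≤ q := by
          by_contra hcon
          have hq1L : q + 1 ≤ L := by omega
          have := wcnt_anti sd x (r+1) hq1L
          omega
        have hmax : max (L : Int) ((q : Int) + 1) = ((q + 1 : Nat) : Int) := by
          rw [max_eq_right]
          · push_cast; ring
          · have : (L : Int) ≤ (q : Int) := by exact_mod_cast hLq
            omega
        rw [hmax] at hbstep
        obtain ⟨mp', hsh, hmp'⟩ := aShrink_spec sd x t ht r hrlen (sd.length+1) L (q+1)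
          (mp.insert x (mp.getD x 0 + 1)) (by omega) (by omega) hmp1 (le_of_eq hw2)
          (fun M h1 h2 => by
            have hMq : M ≤ q := by omega
            have := wcnt_anti sd x (r+1) hMq
            omega) (by omega)
        rw [hsh] at hastep
        refine ⟨q + 1, max ret ((r : Int) - ((q + 1 : Nat) : Int) + 1), mp',
          pos.insert x (((occsL sd x (r+1)).drop (c - t' + 1)).map (fun (i : Nat) => (i : Int))),
          hastep, hbstep, by omega, hmp', ?_, ?_⟩
        · intro v
          by_cases hv : v = x
          · subst hv; omega
          · rw [wcnt_succ_right_ne hx hv]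
            exact le_trans (wcnt_anti sd v r (by omega : L ≤ q + 1)) (hbound v)
        · intro v
          by_cases hv : v = x
          · subst hv
            rw [PySem.Dict.getD_insert_self, hlenO, show c + 1 - t' = c - t' + 1 by omega]
          · rw [PySem.Dict.getD_insert_of_ne _ _ _ hv, hpos v, occsL_succ_ne hx hv]

-- ===== VERDICT (by name: the statement is the Claim_ definition above) =====
theorem longestSubarrayWithMaximum_spec : Claim_equal_longestSubarrayWithMaximum := by
  intro sd t _ hpre
  unfold Spec_longestSubarrayWithMaximum
  rcases hpre with hnil | ht
  · subst hnil; rfl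
  · obtain ⟨L, ret, mp, pos, ha, hb, -, -, -, -⟩ := main_inv sd t ht sd.length le_rfl
    rw [a_eq_aFold, b_eq_bFold, ha, hb]
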